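-- pv_equiv track=rewrite | github.com/sehunfromdaegu/xml_module | xml_module.py | bitarray_to_intarray
-- ===== SOURCE A (Python) =====
-- def bitarray_to_intarray(bitarray, nr=8):
--
--
--     remainder = len(bitarray) % nr
--     bits = bitarray
-- #     if remainder != 0 :
-- #         bits += (nr - remainder) * [0]
--
--     output = [
--         int(''.join([str(i) for i in bits[nr*idx:nr*(idx+1)]]), 2)
--         for idx in range(len(bits) // nr)
--     ]
--
--     return output
-- ===== SOURCE B (Python) =====
-- def bitarray_to_intarray(bitarray, nr=8):
--     output = []
--     for idx in range(len(bitarray) // nr):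
--         acc = 0
--         for b in bitarray[nr*idx:nr*(idx+1)]:
--             acc = 2*acc + b
--         output.append(acc)
--     return output
-- ===== Notes on version B (the rewrite author's own statement) =====
-- stated objective: idiomatic
-- what changed: Each chunk's value is computed by a Horner-style integer accumulator (acc = 2*acc + bit) instead of building a character string per chunk and parsing it with int(s, 2); Pre_ excludes inputs with a non-0/1 element in the processed region, where int(s, 2) raises ValueError except for chunks that concatenate to a valid negative binary literal, a non-bit corner on which neither A's string parse nor B's Horner fold is the specified value.
-- outside the precondition, e.g. on bitarray_to_intarray([-1, 1], 2): A returns [-3], B returns [-1]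
import Mathlib
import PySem

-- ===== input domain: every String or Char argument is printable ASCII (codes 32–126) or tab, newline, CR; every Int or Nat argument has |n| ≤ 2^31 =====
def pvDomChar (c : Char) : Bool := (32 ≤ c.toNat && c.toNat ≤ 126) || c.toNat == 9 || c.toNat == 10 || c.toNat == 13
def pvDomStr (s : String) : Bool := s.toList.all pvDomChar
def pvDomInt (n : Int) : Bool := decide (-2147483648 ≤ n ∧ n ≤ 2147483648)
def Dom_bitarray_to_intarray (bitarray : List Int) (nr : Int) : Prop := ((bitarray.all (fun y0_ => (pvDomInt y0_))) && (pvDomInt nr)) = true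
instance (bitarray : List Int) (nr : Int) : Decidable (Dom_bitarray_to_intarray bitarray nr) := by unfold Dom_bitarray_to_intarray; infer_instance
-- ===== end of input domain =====

-- B replaces A's per-chunk string building + int(s, 2) parse by a Horner-style integer
-- accumulator (idiomatic, same asymptotic cost).

-- ===== PORT A =====
-- int(s, 2): exact on an optional leading '-' followed by '0'/'1' digits — every string on
-- which Python's int(s, 2) returns among those A builds (joins of str(int)); elsewhere Python
-- raises ValueError and Pre_ excludes the input, so this helper is never relied on there.
def pvParseBin (s : String) : Int :=
  if s.toList.head? = some '-' then
    -((s.toList.drop 1).foldl (fun a c => 2 * a + ((c.toNat : Int) - 48)) 0)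
  else
    s.toList.foldl (fun a c => 2 * a + ((c.toNat : Int) - 48)) 0

def bitarray_to_intarray (bitarray : List Int) (nr : Int) : List Int :=
  -- 'remainder = len(bitarray) % nr' is computed but unused; nr = 0 raises ZeroDivisionError
  -- there (excluded by Pre_), so it is dropped here.
  (PySem.List.pyRange 0 (PySem.Int.floordiv (bitarray.length : Int) nr) 1).map
    (fun idx =>
      pvParseBin (PySem.Str.join ""
        ((PySem.List.slice bitarray (some (nr * idx)) (some (nr * (idx + 1)))).map
          PySem.Int.toStr)))

-- ===== PORT B =====
def bitarray_to_intarray_alt (bitarray : List Int) (nr : Int) : List Int :=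
  (PySem.List.pyRange 0 (PySem.Int.floordiv (bitarray.length : Int) nr) 1).foldl
    (fun output idx =>
      output ++
        [(PySem.List.slice bitarray (some (nr * idx)) (some (nr * (idx + 1)))).foldl
          (fun acc b => 2 * acc + b) 0])
    []

-- ===== PRECONDITION & SPEC =====
-- Pre_ excludes nr = 0 (ZeroDivisionError in len % nr) and nr > 0 with a non-0/1 element in
-- the processed region: there int(s, 2) raises ValueError, except for chunks whose concatenated
-- decimal representations happen to form a valid negative binary literal — non-bit input on
-- which A's string parse and B's Horner fold are two equally unspecified readings.
def Pre_bitarray_to_intarray (bitarray : List Int) (nr : Int) : Prop :=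
  nr ≠ 0 ∧ (0 < nr → ∀ x ∈ bitarray.take (bitarray.length / nr.toNat * nr.toNat), x = 0 ∨ x = 1)
instance (bitarray : List Int) (nr : Int) : Decidable (Pre_bitarray_to_intarray bitarray nr) := by unfold Pre_bitarray_to_intarray; infer_instance

def pvWitness_bitarray_to_intarray : List Int × Int := ([1, 0, 1, 1, 0, 0, 1, 1], 4)

def Spec_bitarray_to_intarray (bitarray : List Int) (nr : Int) (out : List Int) : Prop := out = bitarray_to_intarray_alt bitarray nr
instance (bitarray : List Int) (nr : Int) (out : List Int) : Decidable (Spec_bitarray_to_intarray bitarray nr out) := by unfold Spec_bitarray_to_intarray; infer_instance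

-- ===== CLAIM (what is proved, stated in full; the proofs are below) =====
def Claim_equal_bitarray_to_intarray : Prop := ∀ (bitarray : List Int) (nr : Int), Dom_bitarray_to_intarray bitarray nr → Pre_bitarray_to_intarray bitarray nr → Spec_bitarray_to_intarray bitarray nr (bitarray_to_intarray bitarray nr)


-- ===== LEMMAS AND PROOFS =====

-- Per-chunk lemma: parsing the joined decimal strings of a 0/1 list equals the Horner fold.
theorem pvChunk (l : List Int) (h : ∀ x ∈ l, x = 0 ∨ x = 1) :
    pvParseBin (PySem.Str.join "" (l.map PySem.Int.toStr)) =
      l.foldl (fun acc b => 2 * acc + b) 0 := by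
  have hmap : (l.map PySem.Int.toStr).map String.toList
      = (l.map (fun x : Int => if x = 0 then '0' else '1')).map (fun c => [c]) := by
    simp only [List.map_map]
    apply List.map_congr_left
    intro x hx
    rcases h x hx with rfl | rfl <;> simp [PySem.Int.toList_toStr] <;> decide
  have hchars : (PySem.Str.join "" (l.map PySem.Int.toStr)).toList
      = l.map (fun x : Int => if x = 0 then '0' else '1') := by
    rw [PySem.Str.toList_join, hmap]
    exact PySem.Chars.join_nil_singletons _
  have hne : (l.map (fun x : Int => if x = 0 then '0' else '1')).head? ≠ some '-' := by
    cases l with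
    | nil => simp
    | cons x xs =>
      simp only [List.map_cons, List.head?_cons, ne_eq, Option.some.injEq]
      rcases h x (List.mem_cons_self) with rfl | rfl <;> decide
  unfold pvParseBin
  rw [hchars, if_neg hne, List.foldl_map]
  apply PySem.List.foldl_congr_mem
  intro acc x hx
  rcases h x hx with rfl | rfl <;> norm_num <;> decide

theorem pvMemTake {x : Int} {l : List Int} {a b c : Nat}
    (hx : x ∈ (l.drop a).take (b - a)) (hab : a ≤ b) (hbc : b ≤ c) : x ∈ l.take c := by
  have h1 : l.take b = l.take a ++ (l.drop a).take (b - a) := by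
    rw [← List.take_append_drop a (l.take b)]
    congr 1
    · rw [List.take_take, Nat.min_eq_left hab]
    · rw [List.drop_take]
  have h2 : x ∈ l.take b := by rw [h1]; exact List.mem_append_right _ hx
  have h3 : l.take b = (l.take c).take b := by rw [List.take_take, Nat.min_eq_left hbc]
  rw [h3] at h2
  exact List.take_subset _ _ h2

-- ===== VERDICT (by name: the statement is the Claim_ definition above) =====
theorem bitarray_to_intarray_spec : Claim_equal_bitarray_to_intarray := by
  intro bitarray nr _ hPre
  obtain ⟨hnz, h01⟩ := hPre
  unfold Spec_bitarray_to_intarray bitarray_to_intarray bitarray_to_intarray_alt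
  rw [PySem.List.foldl_append_singleton_eq_map, List.nil_append]
  rcases lt_trichotomy nr 0 with hneg | hz | hpos
  · -- nr < 0: the range is empty on both sides
    have : PySem.Int.floordiv (bitarray.length : Int) nr ≤ 0 := by
      unfold PySem.Int.floordiv
      exact Int.fdiv_nonpos_of_nonneg_of_nonpos (Int.natCast_nonneg _) hneg.le
    rw [PySem.List.pyRange_one_eq_nil this]
    rfl
  · exact absurd hz hnz
  · -- nr > 0
    apply List.map_congr_left
    intro idx hidx
    rw [PySem.List.mem_pyRange_one] at hidx
    apply pvChunk
    intro x hx
    apply h01 hpos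
    have hfd : PySem.Int.floordiv (bitarray.length : Int) nr =
        ((bitarray.length / nr.toNat : Nat) : Int) := by
      have : nr = ((nr.toNat : Nat) : Int) := (Int.toNat_of_nonneg hpos.le).symm
      rw [this]
      exact PySem.Int.floordiv_natCast _ _
    have hidx' : idx < ((bitarray.length / nr.toNat : Nat) : Int) := hfd ▸ hidx.2
    have ha : (0:Int) ≤ nr * idx := mul_nonneg hpos.le hidx.1
    have hb : (0:Int) ≤ nr * (idx + 1) := mul_nonneg hpos.le (by omega)
    rw [PySem.List.slice_toNat _ ha hb] at hx
    refine pvMemTake hx ?_ ?_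
    · apply Int.toNat_le_toNat; nlinarith
    · have hle : nr * (idx + 1) ≤ ((bitarray.length / nr.toNat * nr.toNat : Nat) : Int) := by
        push_cast
        have h1 : idx + 1 ≤ ((bitarray.length / nr.toNat : Nat) : Int) := by omega
        have h2 : ((nr.toNat : Nat) : Int) = nr := Int.toNat_of_nonneg hpos.le
        calc nr * (idx + 1) ≤ nr * ((bitarray.length / nr.toNat : Nat) : Int) :=
              mul_le_mul_of_nonneg_left h1 hpos.le
          _ = ((bitarray.length / nr.toNat : Nat) : Int) * ((nr.toNat : Nat) : Int) := by
              rw [h2, mul_comm]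

      calc (nr * (idx + 1)).toNat ≤ ((bitarray.length / nr.toNat * nr.toNat : Nat) : Int).toNat :=
            Int.toNat_le_toNat hle
        _ = bitarray.length / nr.toNat * nr.toNat := Int.toNat_natCast _
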